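-- pv_equiv track=rewrite | github.com/mathysEthical/TextMimic | mimic.py | arrayToInt
-- ===== SOURCE A (Python) =====
-- def arrayToInt(theArray, rotorsCount):
--     total=0
--     factor=1
--     theArray=theArray[::-1]
--     rotorsCount=rotorsCount[::-1]
--     for i in range(len(rotorsCount)):
--         total+=factor*theArray[i]
--         factor*=rotorsCount[i]
--     return total
-- ===== SOURCE B (Python) =====
-- def arrayToInt(theArray, rotorsCount):
--     theArray = theArray[::-1]
--     rotorsCount = rotorsCount[::-1]
--     total = 0
--     for i in range(len(rotorsCount) - 1, -1, -1):
--         total = total * rotorsCount[i] + theArray[i]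
--     return total
-- ===== Notes on version B (the rewrite author's own statement) =====
-- stated objective: alternative
-- what changed: Replaces the two-accumulator (total, factor) ascending loop by Horner's method: a single accumulator processed from the most-significant digit down (total = total*base + digit), with no running factor.
import Mathlib
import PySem

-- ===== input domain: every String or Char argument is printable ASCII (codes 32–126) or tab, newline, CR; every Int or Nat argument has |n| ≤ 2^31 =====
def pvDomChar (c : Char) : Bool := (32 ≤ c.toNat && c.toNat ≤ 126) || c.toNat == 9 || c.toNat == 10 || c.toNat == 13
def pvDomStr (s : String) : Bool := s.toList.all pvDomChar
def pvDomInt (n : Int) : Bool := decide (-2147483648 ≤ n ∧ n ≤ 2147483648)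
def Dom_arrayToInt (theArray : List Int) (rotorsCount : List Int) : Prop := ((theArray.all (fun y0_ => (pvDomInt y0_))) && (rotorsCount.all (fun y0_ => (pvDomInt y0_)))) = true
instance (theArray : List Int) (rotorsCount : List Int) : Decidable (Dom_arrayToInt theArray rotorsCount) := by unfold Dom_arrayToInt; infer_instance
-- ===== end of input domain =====

-- B replaces A's two-accumulator (total, factor) ascending loop by Horner's method with a
-- single accumulator processed most-significant-first (alternative decomposition, same cost).


-- ===== PORT A =====
-- pyGetD is exact here: Pre_ guarantees every index of the loop is in range of both lists
def arrayToInt (theArray : List Int) (rotorsCount : List Int) : Int :=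
  let ta := theArray.reverse
  let rc := rotorsCount.reverse
  let s := (PySem.List.pyRange 0 (rc.length : Int) 1).foldl
    (fun (s : Int × Int) i =>
      (s.1 + s.2 * PySem.List.pyGetD ta i 0, s.2 * PySem.List.pyGetD rc i 0)) (0, 1)
  s.1

-- ===== PORT B =====
-- Horner: single accumulator, countdown range(n-1, -1, -1); pyGetD exact under Pre_
def arrayToInt_alt (theArray : List Int) (rotorsCount : List Int) : Int :=
  let ta := theArray.reverse
  let rc := rotorsCount.reverse
  (PySem.List.pyRange ((rc.length : Int) - 1) (-1) (-1)).foldl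
    (fun total i =>
      total * PySem.List.pyGetD rc i 0 + PySem.List.pyGetD ta i 0) 0

-- ===== PRECONDITION & SPEC =====
-- A raises IndexError exactly when len(theArray) < len(rotorsCount); those inputs are excluded.
def Pre_arrayToInt (theArray : List Int) (rotorsCount : List Int) : Prop :=
  rotorsCount.length ≤ theArray.length
instance (theArray : List Int) (rotorsCount : List Int) : Decidable (Pre_arrayToInt theArray rotorsCount) := by unfold Pre_arrayToInt; infer_instance
def pvWitness_arrayToInt : List Int × List Int := ([7, 2, 3], [10, 10, 10])

def Spec_arrayToInt (theArray : List Int) (rotorsCount : List Int) (out : Int) : Prop := out = arrayToInt_alt theArray rotorsCount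
instance (theArray : List Int) (rotorsCount : List Int) (out : Int) : Decidable (Spec_arrayToInt theArray rotorsCount out) := by unfold Spec_arrayToInt; infer_instance

-- ===== CLAIM (what is proved, stated in full; the proofs are below) =====
def Claim_equal_arrayToInt : Prop := ∀ (theArray : List Int) (rotorsCount : List Int), Dom_arrayToInt theArray rotorsCount → Pre_arrayToInt theArray rotorsCount → Spec_arrayToInt theArray rotorsCount (arrayToInt theArray rotorsCount)

-- ===== LEMMAS AND PROOFS =====

-- Common mathematical value: mixed-radix Horner on (digits, bases) aligned head-to-head.
def pvH : List Int → List Int → Int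
  | a :: as, r :: rs => a + r * pvH as rs
  | _, _ => 0

-- A's fold (over List.range with List.getD) computes t + f * pvH ta rc.
theorem pvA_fold (rc : List Int) : ∀ (ta : List Int) (t f : Int), rc.length ≤ ta.length →
    ((List.range rc.length).foldl
      (fun (s : Int × Int) k => (s.1 + s.2 * ta.getD k 0, s.2 * rc.getD k 0)) (t, f)).1
      = t + f * pvH ta rc := by
  induction rc with
  | nil => intro ta t f _; simp [pvH]
  | cons r rs ih =>
    intro ta t f h
    cases ta with
    | nil => simp at h
    | cons a as =>
      simp only [List.length_cons]
      rw [List.range_succ_eq_map]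
      simp only [List.foldl_cons, List.foldl_map, List.getD_cons_zero, List.getD_cons_succ]
      rw [ih as (t + f * a) (f * r) (by simpa using h)]
      simp [pvH]; ring

-- B's fold (a foldr over List.range) computes pvH ta rc.
theorem pvB_fold (rc : List Int) : ∀ (ta : List Int), rc.length ≤ ta.length →
    (List.range rc.length).foldr
      (fun k total => total * rc.getD k 0 + ta.getD k 0) 0 = pvH ta rc := by
  induction rc with
  | nil => intro ta _; simp [pvH]
  | cons r rs ih =>
    intro ta h
    cases ta with
    | nil => simp at h
    | cons a as =>
      simp only [List.length_cons]
      rw [List.range_succ_eq_map]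
      simp only [List.foldr_cons, List.foldr_map, List.getD_cons_zero, List.getD_cons_succ]
      rw [ih as (by simpa using h)]
      simp [pvH]; ring

theorem pvA_eq (theArray rotorsCount : List Int)
    (h : rotorsCount.length ≤ theArray.length) :
    arrayToInt theArray rotorsCount = pvH theArray.reverse rotorsCount.reverse := by
  unfold arrayToInt
  dsimp only
  rw [PySem.List.pyRange_zero_natCast]
  simp only [List.foldl_map, PySem.List.pyGetD_natCast]
  rw [pvA_fold rotorsCount.reverse theArray.reverse 0 1 (by simpa using h)]
  ring

theorem pvB_eq (theArray rotorsCount : List Int)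
    (h : rotorsCount.length ≤ theArray.length) :
    arrayToInt_alt theArray rotorsCount = pvH theArray.reverse rotorsCount.reverse := by
  unfold arrayToInt_alt
  dsimp only
  have hrev : PySem.List.pyRange ((rotorsCount.reverse.length : Int) - 1) (-1) (-1)
      = (PySem.List.pyRange 0 (rotorsCount.reverse.length : Int) 1).reverse := by
    rw [PySem.List.pyRange_neg_one_eq_reverse]; norm_num
  rw [hrev, List.foldl_reverse, PySem.List.pyRange_zero_natCast]
  simp only [List.foldr_map, PySem.List.pyGetD_natCast]
  exact pvB_fold rotorsCount.reverse theArray.reverse (by simpa using h)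

-- ===== VERDICT (by name: the statement is the Claim_ definition above) =====
theorem arrayToInt_spec : Claim_equal_arrayToInt := by
  intro theArray rotorsCount _ hpre
  unfold Spec_arrayToInt
  rw [pvA_eq _ _ hpre, pvB_eq _ _ hpre]
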